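-- pv_equiv track=rewrite | github.com/consistentJake/AgenticRecommender | agentic_recommender/evaluation/rerank_eval.py | _parse_pick
-- ===== SOURCE A (Python) =====
-- from typing import Dict, List, Tuple, Set, Optional, Any
--
-- def _parse_pick(response: str, candidates: List[str]) -> str:
--     """Parse LLM response to extract cuisine pick."""
--     response = response.strip().lower()
--
--     # Direct match
--     for candidate in candidates:
--         if candidate.lower() == response:
--             return candidate
--
--     # Partial match
--     for candidate in candidates:
--         if candidate.lower() in response:
--             return candidate
--
--     # Fallback: return first candidate mentioned
--     for candidate in candidates:
--         if candidate.lower() in response.lower():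
--             return candidate
--
--     # Last resort: return empty or first candidate
--     return candidates[0] if candidates else ""
-- ===== SOURCE B (Python) =====
-- def _parse_pick(response, candidates):
--     """Parse LLM response to extract cuisine pick (single pass)."""
--     response = response.strip().lower()
--     first_partial = None
--     for candidate in candidates:
--         c = candidate.lower()
--         if c == response:
--             return candidate
--         if first_partial is None and c in response:
--             first_partial = candidate
--     if first_partial is not None:
--         return first_partial
--     return candidates[0] if candidates else ""
-- ===== Notes on version B (the rewrite author's own statement) =====
-- stated objective: simpler
-- what changed: Replaced A's three sequential scans of candidates (exact, partial, and a redundant re-lowered partial pass) plus fallback by a single pass that returns on the first exact match and remembers the first partial match as the fallback.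
import Mathlib
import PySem

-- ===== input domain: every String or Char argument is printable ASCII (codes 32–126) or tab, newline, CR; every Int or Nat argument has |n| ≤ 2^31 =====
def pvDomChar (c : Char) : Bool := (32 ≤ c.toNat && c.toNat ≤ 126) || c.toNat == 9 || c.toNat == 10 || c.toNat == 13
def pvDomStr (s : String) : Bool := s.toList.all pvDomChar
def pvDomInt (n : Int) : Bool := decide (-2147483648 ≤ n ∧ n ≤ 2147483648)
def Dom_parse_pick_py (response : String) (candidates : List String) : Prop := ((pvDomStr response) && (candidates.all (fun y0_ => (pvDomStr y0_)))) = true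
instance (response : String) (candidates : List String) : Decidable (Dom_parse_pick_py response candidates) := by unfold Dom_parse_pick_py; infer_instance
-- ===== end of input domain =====

-- B replaces A's three sequential scans over `candidates` by one pass that returns on the
-- first exact match and remembers the first partial match as fallback (objective: simpler).


-- ===== PORT A =====
-- r = response.strip().lower(); then three for-loops with early return, then the fallback.
def parse_pick_py (response : String) (candidates : List String) : String :=
  let r := PySem.Str.lower (PySem.Str.strip response)
  match candidates.find? (fun candidate => PySem.Str.lower candidate == r) with
  | some candidate => candidate
  | none =>
    match candidates.find? (fun candidate => PySem.Str.isIn (PySem.Str.lower candidate) r) with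
    | some candidate => candidate
    | none =>
      match candidates.find? (fun candidate => PySem.Str.isIn (PySem.Str.lower candidate) (PySem.Str.lower r)) with
      | some candidate => candidate
      | none => match candidates with | [] => "" | c :: _ => c

-- ===== PORT B =====
-- single pass: return on first exact match, remember the first partial match
def pickScan (r : String) : List String → Option String → Option String
  | [], firstPartial => firstPartial
  | candidate :: rest, firstPartial =>
    let c := PySem.Str.lower candidate
    if c == r then some candidate
    else pickScan r rest
      (if firstPartial.isNone && PySem.Str.isIn c r then some candidate else firstPartial)

def parse_pick_py_alt (response : String) (candidates : List String) : String :=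
  let r := PySem.Str.lower (PySem.Str.strip response)
  match pickScan r candidates none with
  | some c => c
  | none => match candidates with | [] => "" | c :: _ => c

-- ===== PRECONDITION & SPEC =====
def Spec_parse_pick_py (response : String) (candidates : List String) (out : String) : Prop := out = parse_pick_py_alt response candidates
instance (response : String) (candidates : List String) (out : String) : Decidable (Spec_parse_pick_py response candidates out) := by unfold Spec_parse_pick_py; infer_instance

-- ===== CLAIM (what is proved, stated in full; the proofs are below) =====
def Claim_equal_parse_pick_py : Prop := ∀ (response : String) (candidates : List String), Dom_parse_pick_py response candidates → Spec_parse_pick_py response candidates (parse_pick_py response candidates)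

-- ===== LEMMAS AND PROOFS =====

lemma lowerChar_idem (c : Char) :
    PySem.Chars.lowerChar (PySem.Chars.lowerChar c) = PySem.Chars.lowerChar c := by
  simp only [PySem.Chars.lowerChar, PySem.Chars.isupper, Bool.and_eq_true, decide_eq_true_eq,
    Char.le_def]
  split_ifs with h1 h2
  · exfalso
    obtain ⟨a1, a2⟩ := h1
    obtain ⟨b1, b2⟩ := h2
    have ha' : 65 ≤ c.val.toNat := UInt32.le_iff_toNat_le.mp a1
    have hz' : c.val.toNat ≤ 90 := UInt32.le_iff_toNat_le.mp a2
    have ec : c.toNat = c.val.toNat := rfl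
    have hv : (Char.ofNat (c.toNat + 32)).toNat = c.toNat + 32 := by
      rw [Char.toNat_ofNat, if_pos]
      left; rw [ec]; omega
    have hb : (Char.ofNat (c.toNat + 32)).val.toNat ≤ 90 := UInt32.le_iff_toNat_le.mp b2
    have ed : (Char.ofNat (c.toNat + 32)).val.toNat = (Char.ofNat (c.toNat + 32)).toNat := rfl
    rw [ed, hv, ec] at hb
    omega
  · rfl
  · rfl

lemma chars_lower_idem (s : List Char) :
    PySem.Chars.lower (PySem.Chars.lower s) = PySem.Chars.lower s := by
  simp only [PySem.Chars.lower, List.map_map, List.map_inj_left, Function.comp_apply]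
  exact fun a _ => lowerChar_idem a

lemma str_lower_idem (s : String) :
    PySem.Str.lower (PySem.Str.lower s) = PySem.Str.lower s := by
  have h : (PySem.Str.lower (PySem.Str.lower s)).toList = (PySem.Str.lower s).toList := by
    simp [chars_lower_idem]
  exact String.toList_inj.mp h

-- what the single pass computes: first exact match, else the pending partial, else the
-- first partial match of the remaining list
lemma pickScan_eq (r : String) (cs : List String) (fp : Option String) :
    pickScan r cs fp =
      ((cs.find? (fun c => PySem.Str.lower c == r)).or
        (fp.or (cs.find? (fun c => PySem.Str.isIn (PySem.Str.lower c) r)))) := by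
  induction cs generalizing fp with
  | nil => cases fp <;> simp [pickScan]
  | cons c cs ih =>
    by_cases h : (PySem.Str.lower c == r) = true
    · simp [pickScan, h]
    · rw [show pickScan r (c :: cs) fp = pickScan r cs
        (if fp.isNone && PySem.Str.isIn (PySem.Str.lower c) r then some c else fp) by
          simp [pickScan, h]]
      rw [ih]
      simp only [List.find?_cons, h]
      cases fp with
      | some p => simp
      | none =>
        by_cases hin : PySem.Chars.isIn (PySem.Chars.lower c.toList) r.toList = true
        · simp [hin]
        · simp [hin]

-- ===== VERDICT (by name: the statement is the Claim_ definition above) =====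
theorem parse_pick_py_spec : Claim_equal_parse_pick_py := by
  intro response candidates _
  unfold Spec_parse_pick_py parse_pick_py parse_pick_py_alt
  simp only [pickScan_eq, str_lower_idem, Option.none_or]
  cases hE : List.find? (fun candidate => PySem.Str.lower candidate == PySem.Str.lower (PySem.Str.strip response)) candidates with
  | some e => simp
  | none =>
    cases hP : List.find? (fun candidate => PySem.Chars.isIn (PySem.Chars.lower candidate.toList) (PySem.Chars.lower (PySem.Chars.strip response.toList))) candidates with
    | some p => simp [hP]
    | none => simp [hP]
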